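-- pv_equiv track=rewrite | github.com/Lassitoo/docmind_project | chat/services.py | extract_changes_list
-- ===== SOURCE A (Python) =====
-- def extract_changes_list(comparison_text: str) -> list:
--     """
--     Extrait une liste de modifications suggérées depuis le texte de comparaison
--     """
--     changes = []
--
--     # Parser le texte pour extraire les différences
--     lines = comparison_text.split('\n')
--     current_change = None
--
--     for line in lines:
--         line = line.strip()
--         if not line:
--             continue
--
--         # Détecter les sections de différences
--         if 'Document 1:' in line or 'Document 2:' in line:
--             if current_change:
--                 changes.append(current_change)
--             current_change = line
--         elif current_change and line.startswith('-'):
--             current_change += ' ' + line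
--
--     if current_change:
--         changes.append(current_change)
--
--     return changes[:10]  # Limiter à 10 changements principaux
-- ===== SOURCE B (Python) =====
-- def _is_header(l):
--     return 'Document 1:' in l or 'Document 2:' in l
--
--
-- def extract_changes_list(comparison_text: str) -> list:
--     """Header-segmentation rewrite: strip all lines once, skip to the first
--     header, then for each header collect the '-' lines up to the next header
--     and join them; first ten entries."""
--     lines = [l.strip() for l in comparison_text.split('\n')]
--     n = len(lines)
--     i = 0
--     while i < n and not _is_header(lines[i]):
--         i += 1
--     entries = []
--     while i < n:
--         header = lines[i]
--         i += 1
--         body = []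
--         while i < n and not _is_header(lines[i]):
--             if lines[i].startswith('-'):
--                 body.append(lines[i])
--             i += 1
--         entries.append(' '.join([header] + body))
--     return entries[:10]
-- ===== Notes on version B (the rewrite author's own statement) =====
-- stated objective: alternative
-- what changed: Replaces A's single pass with a running current_change string accumulator by an explicit header-segmentation: strip all lines once, skip to the first header, then for each header collect the '-' lines up to the next header and join them with ' '.join in one step.
import Mathlib
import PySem

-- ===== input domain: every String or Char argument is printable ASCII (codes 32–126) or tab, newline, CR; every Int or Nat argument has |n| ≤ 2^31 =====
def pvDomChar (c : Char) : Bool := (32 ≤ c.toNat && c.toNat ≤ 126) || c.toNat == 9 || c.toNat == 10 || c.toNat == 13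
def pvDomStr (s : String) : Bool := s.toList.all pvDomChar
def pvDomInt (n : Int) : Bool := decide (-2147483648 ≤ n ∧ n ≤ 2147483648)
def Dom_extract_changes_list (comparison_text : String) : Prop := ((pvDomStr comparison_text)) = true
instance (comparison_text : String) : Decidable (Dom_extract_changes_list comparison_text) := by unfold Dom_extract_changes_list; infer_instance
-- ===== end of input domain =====

-- B replaces A's one-pass running-accumulator parse by an explicit header-segmentation
-- (skip to the first header, then per header collect the '-' lines up to the next header
-- and join them once); objective: alternative decomposition, same cost.

-- ===== PORT A =====
-- loop body of A: state = (changes, current_change); current_change = none models Python's None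
-- (current_change is never the empty string: it always starts from a header line, which
-- contains 'Document 1:'/'Document 2:', so Python's string-truthiness test is its some-test)
def pvStepA (st : List String × Option String) (line : String) : List String × Option String :=
  let line := PySem.Str.strip line
  if line = "" then st
  else if PySem.Str.isIn "Document 1:" line || PySem.Str.isIn "Document 2:" line then
    match st.2 with
    | some c => (st.1 ++ [c], some line)
    | none => (st.1, some line)
  else
    match st.2 with
    | some c => if PySem.Str.startswith line "-" then (st.1, some (c ++ " " ++ line)) else st
    | none => st

-- the final 'if current_change: changes.append(current_change)'
def pvFinA (st : List String × Option String) : List String :=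
  match st.2 with | some c => st.1 ++ [c] | none => st.1

def extract_changes_list (comparison_text : String) : List String :=
  let lines := (PySem.Str.split? comparison_text "\n").getD []
  PySem.List.slice (pvFinA (lines.foldl pvStepA ([], none))) none (some 10)

-- ===== PORT B =====
def pvIsHeader (l : String) : Bool :=
  PySem.Str.isIn "Document 1:" l || PySem.Str.isIn "Document 2:" l

-- first while loop of B: skip lines before the first header
def pvSkip : List String → List String
  | [] => []
  | l :: rest => if pvIsHeader l then l :: rest else pvSkip rest

-- inner while loop of B: ('-'-lines before the next header, the rest from that header on)
def pvCollect : List String → List String × List String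
  | [] => ([], [])
  | l :: rest =>
    if pvIsHeader l then ([], l :: rest)
    else
      let p := pvCollect rest
      (if PySem.Str.startswith l "-" then l :: p.1 else p.1, p.2)

-- termination measure for pvBuild (cited by its decreasing_by)
theorem pvCollect_snd_le (ls : List String) : (pvCollect ls).2.length ≤ ls.length := by
  induction ls with
  | nil => simp [pvCollect]
  | cons l rest ih =>
    simp only [pvCollect]
    split
    · simp
    · simpa using Nat.le_succ_of_le ih

-- outer while loop of B: one entry per header
def pvBuild : List String → List String
  | [] => []
  | l :: rest =>
    PySem.Str.join " " (l :: (pvCollect rest).1) :: pvBuild (pvCollect rest).2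
termination_by ls => ls.length
decreasing_by
  exact Nat.lt_succ_of_le (pvCollect_snd_le rest)

def extract_changes_list_alt (comparison_text : String) : List String :=
  let lines := ((PySem.Str.split? comparison_text "\n").getD []).map PySem.Str.strip
  PySem.List.slice (pvBuild (pvSkip lines)) none (some 10)

-- ===== PRECONDITION & SPEC =====
def Spec_extract_changes_list (comparison_text : String) (out : List String) : Prop := out = extract_changes_list_alt comparison_text
instance (comparison_text : String) (out : List String) : Decidable (Spec_extract_changes_list comparison_text out) := by unfold Spec_extract_changes_list; infer_instance

-- ===== CLAIM (what is proved, stated in full; the proofs are below) =====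
def Claim_equal_extract_changes_list : Prop := ∀ (comparison_text : String), Dom_extract_changes_list comparison_text → Spec_extract_changes_list comparison_text (extract_changes_list comparison_text)

-- ===== LEMMAS AND PROOFS =====

-- ' '.join([h] + b) equals A's incremental 'c += " " + line' accumulation
theorem pv_join_cons (h : String) (b : List String) :
    PySem.Str.join " " (h :: b) = b.foldl (fun a l => a ++ " " ++ l) h := by
  induction b generalizing h with
  | nil => simp [PySem.Str.join, PySem.Chars.join, List.intercalate]
  | cons x b ih =>
    have e : PySem.Str.join " " (h :: x :: b) = PySem.Str.join " " ((h ++ " " ++ x) :: b) := by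
      have : (PySem.Str.join " " (h :: x :: b)).toList
           = (PySem.Str.join " " ((h ++ " " ++ x) :: b)).toList := by
        cases b <;> simp [PySem.Str.join, PySem.Chars.join, List.intercalate, List.intersperse]
      exact String.toList_inj.mp this
    rw [e, ih]
    simp


-- A's loop from a live current_change c: finish the current entry (pvCollect), then pvBuild
theorem pv_loopA_some (ls : List String) : ∀ (acc : List String) (c : String),
    pvFinA (ls.foldl pvStepA (acc, some c)) =
      acc ++ ((pvCollect (ls.map PySem.Str.strip)).1.foldl (fun a l => a ++ " " ++ l) c
              :: pvBuild (pvCollect (ls.map PySem.Str.strip)).2) := by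
  induction ls with
  | nil => intro acc c; simp [pvFinA, pvCollect, pvBuild]
  | cons l ls ih =>
    intro acc c
    simp only [List.foldl_cons, List.map_cons]
    by_cases h0 : PySem.Str.strip l = ""
    · have step : pvStepA (acc, some c) l = (acc, some c) := by simp [pvStepA, h0]
      rw [step, ih, h0]
      have hH : pvIsHeader "" = false := by decide
      simp [pvCollect, hH, (by decide : PySem.Chars.startswith ([] : List Char) ['-'] = false)]
    · by_cases hh : pvIsHeader (PySem.Str.strip l) = true
      · have hh2 := hh
        simp [pvIsHeader] at hh2
        have step : pvStepA (acc, some c) l = (acc ++ [c], some (PySem.Str.strip l)) := by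
          rcases hh2 with h1 | h1 <;> simp [pvStepA, h0, h1]
        rw [step, ih]
        simp [pvCollect, hh, pvBuild, pv_join_cons]
      · have hh2 := hh
        simp [pvIsHeader] at hh2
        obtain ⟨h1, h2⟩ := hh2
        by_cases hd : PySem.Str.startswith (PySem.Str.strip l) "-" = true
        · have hd' : PySem.Chars.startswith (PySem.Chars.strip l.toList) ['-'] = true := by
            simpa using hd
          have step : pvStepA (acc, some c) l = (acc, some (c ++ " " ++ PySem.Str.strip l)) := by
            simp [pvStepA, h0, h1, h2, hd']
          rw [step, ih]
          simp [pvCollect, hh, hd']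
        · have hd' : PySem.Chars.startswith (PySem.Chars.strip l.toList) ['-'] = false := by
            simpa using hd
          have step : pvStepA (acc, some c) l = (acc, some c) := by
            simp [pvStepA, h0, h1, h2, hd']
          rw [step, ih]
          simp [pvCollect, hh, hd']


-- A's loop from current_change = None: skip to the first header, then pvBuild
theorem pv_loopA_none (ls : List String) : ∀ (acc : List String),
    pvFinA (ls.foldl pvStepA (acc, none)) = acc ++ pvBuild (pvSkip (ls.map PySem.Str.strip)) := by
  induction ls with
  | nil => intro acc; simp [pvFinA, pvSkip, pvBuild]
  | cons l ls ih =>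
    intro acc
    simp only [List.foldl_cons, List.map_cons]
    by_cases hh : pvIsHeader (PySem.Str.strip l) = true
    · have h0 : PySem.Str.strip l ≠ "" := by
        intro e; rw [e] at hh; exact absurd hh (by decide)
      have hh2 := hh
      simp [pvIsHeader] at hh2
      have step : pvStepA (acc, none) l = (acc, some (PySem.Str.strip l)) := by
        rcases hh2 with h1 | h1 <;> simp [pvStepA, h0, h1]
      rw [step, pv_loopA_some ls acc (PySem.Str.strip l)]
      simp [pvSkip, hh, pvBuild, pv_join_cons]
    · have hh2 := hh
      simp [pvIsHeader] at hh2
      obtain ⟨h1, h2⟩ := hh2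
      have step : pvStepA (acc, none) l = (acc, none) := by
        by_cases h0 : PySem.Str.strip l = "" <;> simp [pvStepA, h0, h1, h2]
      rw [step, ih]
      simp [pvSkip, hh]

-- ===== VERDICT (by name: the statement is the Claim_ definition above) =====
theorem extract_changes_list_spec : Claim_equal_extract_changes_list := by
  intro t _
  unfold Spec_extract_changes_list extract_changes_list extract_changes_list_alt
  simp only [pv_loopA_none _ [], List.nil_append]
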